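-- pv_equiv track=rewrite | github.com/Akash-Metta/Metta | social_moderation/modules/text_blur.py | _group_words_into_sentences
-- ===== SOURCE A (Python) =====
-- def _group_words_into_sentences(word_detections, y_threshold=20):
--     """
--     Group detected words into sentences based on vertical proximity
--     """
--     if not word_detections:
--         return []
--
--     # Sort by Y coordinate
--     sorted_words = sorted(word_detections, key=lambda x: x[0][1])
--
--     sentences = []
--     current_sentence = [sorted_words[0]]
--
--     for i in range(1, len(sorted_words)):
--         prev_y = sorted_words[i-1][0][1]
--         curr_y = sorted_words[i][0][1]
--
--         # If Y difference is small, same sentence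
--         if abs(curr_y - prev_y) <= y_threshold:
--             current_sentence.append(sorted_words[i])
--         else:
--             # New sentence
--             if current_sentence:
--                 sentences.append(current_sentence)
--             current_sentence = [sorted_words[i]]
--
--     if current_sentence:
--         sentences.append(current_sentence)
--
--     return sentences
-- ===== SOURCE B (Python) =====
-- def _group_words_into_sentences(word_detections, y_threshold=20):
--     """
--     Group detected words into sentences based on vertical proximity
--     """
--     sorted_words = sorted(word_detections, key=lambda x: x[0][1])
--     sentences = []
--     i = 0
--     n = len(sorted_words)
--     while i < n:
--         # scan forward to the end of the current run of vertically-close words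
--         j = i + 1
--         while j < n and abs(sorted_words[j][0][1] - sorted_words[j-1][0][1]) <= y_threshold:
--             j += 1
--         sentences.append(sorted_words[i:j])
--         i = j
--     return sentences
-- ===== Notes on version B (the rewrite author's own statement) =====
-- stated objective: simpler
-- what changed: Replaces A's single interleaved loop with dual accumulators (sentences + current_sentence, emptiness guards, trailing flush) by a scan-to-end-of-run-then-slice decomposition: an outer loop that finds each run's end index with an inner scan and emits the slice, needing no carried partial-sentence state.
import Mathlib
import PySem

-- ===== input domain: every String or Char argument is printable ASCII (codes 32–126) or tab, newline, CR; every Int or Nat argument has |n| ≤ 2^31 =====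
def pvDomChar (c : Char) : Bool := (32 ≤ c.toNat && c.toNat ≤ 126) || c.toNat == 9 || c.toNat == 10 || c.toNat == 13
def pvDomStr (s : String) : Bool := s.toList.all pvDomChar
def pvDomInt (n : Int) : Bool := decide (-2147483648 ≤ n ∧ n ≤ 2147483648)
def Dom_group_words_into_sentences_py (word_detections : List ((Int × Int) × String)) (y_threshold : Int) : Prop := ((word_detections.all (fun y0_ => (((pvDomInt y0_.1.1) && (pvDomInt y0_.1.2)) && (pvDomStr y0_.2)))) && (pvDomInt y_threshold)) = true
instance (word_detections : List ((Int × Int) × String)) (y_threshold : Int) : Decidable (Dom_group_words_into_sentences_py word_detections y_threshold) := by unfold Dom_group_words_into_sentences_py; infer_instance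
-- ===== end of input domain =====

-- B groups the sorted words with a scan-to-end-of-run-then-slice decomposition instead of A's
-- interleaved loop with dual accumulators; same cost, simpler state (return value proved equal).

-- ===== PORT A =====
def group_words_into_sentences_py (word_detections : List ((Int × Int) × String)) (y_threshold : Int) : List (List ((Int × Int) × String)) :=
  if word_detections = [] then []
  else
    let sorted_words := PySem.List.sorted word_detections (fun x => x.1.2) false
    let res := (PySem.List.pyRange 1 (sorted_words.length : Int) 1).foldl
      (fun (st : List (List ((Int × Int) × String)) × List ((Int × Int) × String)) i =>
        let prev_y := (PySem.List.pyGetD sorted_words (i - 1) ((0, 0), "")).1.2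
        let curr_y := (PySem.List.pyGetD sorted_words i ((0, 0), "")).1.2
        if |curr_y - prev_y| ≤ y_threshold then
          (st.1, st.2 ++ [PySem.List.pyGetD sorted_words i ((0, 0), "")])
        else
          ((if st.2 = [] then st.1 else st.1 ++ [st.2]), [PySem.List.pyGetD sorted_words i ((0, 0), "")]))
      ([], [PySem.List.pyGetD sorted_words 0 ((0, 0), "")])
    if res.2 = [] then res.1 else res.1 ++ [res.2]

-- ===== PORT B =====
-- inner `while j < n and abs(...) <= y_threshold` scan: returns (the run continuing after prev, the rest)
def pvRun (y_threshold : Int) (prev : (Int × Int) × String) : List ((Int × Int) × String) → List ((Int × Int) × String) × List ((Int × Int) × String)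
  | [] => ([], [])
  | w :: ws =>
    if |w.1.2 - prev.1.2| ≤ y_threshold then
      let p := pvRun y_threshold w ws
      (w :: p.1, p.2)
    else ([], w :: ws)

theorem pvRun_snd_length (y_threshold : Int) (prev : (Int × Int) × String) (xs : List ((Int × Int) × String)) :
    (pvRun y_threshold prev xs).2.length ≤ xs.length := by
  induction xs generalizing prev with
  | nil => simp [pvRun]
  | cons w ws ih =>
    simp only [pvRun]
    split
    · exact Nat.le_succ_of_le (ih w)
    · simp

-- outer `while i < n` loop: emit the slice sorted_words[i:j] and continue from i = j
def pvGo (y_threshold : Int) : List ((Int × Int) × String) → List (List ((Int × Int) × String))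
  | [] => []
  | x :: rest =>
    let p := pvRun y_threshold x rest
    (x :: p.1) :: pvGo y_threshold p.2
  termination_by xs => xs.length
  decreasing_by
    simpa using Nat.lt_succ_of_le (pvRun_snd_length y_threshold x rest)

def group_words_into_sentences_py_alt (word_detections : List ((Int × Int) × String)) (y_threshold : Int) : List (List ((Int × Int) × String)) :=
  pvGo y_threshold (PySem.List.sorted word_detections (fun x => x.1.2) false)

-- ===== PRECONDITION & SPEC =====
def Spec_group_words_into_sentences_py (word_detections : List ((Int × Int) × String)) (y_threshold : Int) (out : List (List ((Int × Int) × String))) : Prop := out = group_words_into_sentences_py_alt word_detections y_threshold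
instance (word_detections : List ((Int × Int) × String)) (y_threshold : Int) (out : List (List ((Int × Int) × String))) : Decidable (Spec_group_words_into_sentences_py word_detections y_threshold out) := by unfold Spec_group_words_into_sentences_py; infer_instance

-- ===== CLAIM (what is proved, stated in full; the proofs are below) =====
def Claim_equal_group_words_into_sentences_py : Prop := ∀ (word_detections : List ((Int × Int) × String)) (y_threshold : Int), Dom_group_words_into_sentences_py word_detections y_threshold → Spec_group_words_into_sentences_py word_detections y_threshold (group_words_into_sentences_py word_detections y_threshold)

-- ===== LEMMAS AND PROOFS =====

-- prepend C onto the first group (proof bookkeeping for A's carried current_sentence)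
def pvGlue (C : List ((Int × Int) × String)) : List (List ((Int × Int) × String)) → List (List ((Int × Int) × String))
  | [] => []
  | g :: gs => (C ++ g) :: gs

-- A's loop body, reformulated on a consecutive pair instead of two indexed reads
def pvStep (y_threshold : Int)
    (st : List (List ((Int × Int) × String)) × List ((Int × Int) × String))
    (p : ((Int × Int) × String) × ((Int × Int) × String)) :
    List (List ((Int × Int) × String)) × List ((Int × Int) × String) :=
  if |p.2.1.2 - p.1.1.2| ≤ y_threshold then (st.1, st.2 ++ [p.2])
  else ((if st.2 = [] then st.1 else st.1 ++ [st.2]), [p.2])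

-- consecutive pairs of l, as a closed form over indices
theorem pv_zip_tail_eq (l : List ((Int × Int) × String)) (d : (Int × Int) × String) :
    l.zip l.tail = (List.range (l.length - 1)).map (fun k => (l.getD k d, l.getD (k + 1) d)) := by
  apply List.ext_getElem
  · simp [List.length_zip]
  · intro k h1 h2
    have hlen : k < l.length - 1 := by simpa [List.length_zip] using h1
    have hk : k < l.length := by omega
    have hk1 : k + 1 < l.length := by omega
    simp [List.getElem_zip, List.getElem_tail, List.getD_eq_getElem?_getD, hk, hk1]

-- A's index fold over range(1, len(l)) equals the fold of pvStep over consecutive pairs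
theorem pv_index_fold_eq (y_threshold : Int) (l : List ((Int × Int) × String))
    (init : List (List ((Int × Int) × String)) × List ((Int × Int) × String)) :
    (PySem.List.pyRange 1 (l.length : Int) 1).foldl
      (fun st i =>
        if |(PySem.List.pyGetD l i ((0, 0), "")).1.2 - (PySem.List.pyGetD l (i - 1) ((0, 0), "")).1.2| ≤ y_threshold then
          (st.1, st.2 ++ [PySem.List.pyGetD l i ((0, 0), "")])
        else
          ((if st.2 = [] then st.1 else st.1 ++ [st.2]), [PySem.List.pyGetD l i ((0, 0), "")]))
      init
    = (l.zip l.tail).foldl (pvStep y_threshold) init := by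
  rw [PySem.List.pyRange_one, List.foldl_map,
    pv_zip_tail_eq l ((0, 0), ""), List.foldl_map]
  have hn : ((l.length : Int) - 1).toNat = l.length - 1 := by omega
  rw [hn]
  apply PySem.List.foldl_congr_mem
  intro st k hk
  have e1 : PySem.List.pyGetD l (1 + (k : Int) - 1) ((0, 0), "") = l.getD k ((0, 0), "") := by
    have h : (1 : Int) + (k : Int) - 1 = ((k : Nat) : Int) := by omega
    rw [h, PySem.List.pyGetD_natCast]
  have e2 : PySem.List.pyGetD l (1 + (k : Int)) ((0, 0), "") = l.getD (k + 1) ((0, 0), "") := by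
    have h : (1 : Int) + (k : Int) = (((k + 1 : Nat)) : Int) := by omega
    rw [h, PySem.List.pyGetD_natCast]
  simp only [pvStep, e1, e2]

-- the heart: A's accumulate-and-flush fold equals B's run recursion, for any carried state
theorem pv_chunk (y_threshold : Int) :
    ∀ (rest : List ((Int × Int) × String)) (prev : (Int × Int) × String)
      (S : List (List ((Int × Int) × String))) (C : List ((Int × Int) × String)),
    (let r := ((prev :: rest).zip rest).foldl (pvStep y_threshold) (S, C ++ [prev])
     if r.2 = [] then r.1 else r.1 ++ [r.2])
    = S ++ pvGlue C (pvGo y_threshold (prev :: rest)) := by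
  intro rest
  induction rest with
  | nil =>
    intro prev S C
    simp [pvGo, pvRun, pvGlue]
  | cons y ys ih =>
    intro prev S C
    simp only [List.zip_cons_cons, List.foldl_cons]
    by_cases h : |y.1.2 - prev.1.2| ≤ y_threshold
    · have hstep : pvStep y_threshold (S, C ++ [prev]) (prev, y) = (S, (C ++ [prev]) ++ [y]) := by
        simp [pvStep, h]
      rw [hstep, ih y S (C ++ [prev])]
      simp only [pvGo, pvRun, if_pos h]
      cases hp : pvRun y_threshold y ys with
      | mk c r => simp [pvGlue]
    · have hstep : pvStep y_threshold (S, C ++ [prev]) (prev, y) = (S ++ [C ++ [prev]], [] ++ [y]) := by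
        simp [pvStep, h]
      rw [hstep, ih y (S ++ [C ++ [prev]]) []]
      simp only [pvGo, pvRun, if_neg h]
      cases hg : pvGo y_threshold (y :: ys) with
      | nil => simp [pvGo] at hg
      | cons g gs => simp [pvGlue]

-- ===== VERDICT (by name: the statement is the Claim_ definition above) =====
theorem group_words_into_sentences_py_spec : Claim_equal_group_words_into_sentences_py := by
  intro word_detections y_threshold _
  unfold Spec_group_words_into_sentences_py group_words_into_sentences_py group_words_into_sentences_py_alt
  by_cases hwd : word_detections = []
  · simp [hwd, PySem.List.sorted, pvGo]
  · rw [if_neg hwd]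
    cases hs : PySem.List.sorted word_detections (fun x => x.1.2) false with
    | nil =>
      exfalso
      have := PySem.List.sorted_perm word_detections (fun x => x.1.2) false
      rw [hs] at this
      exact hwd (this.symm.eq_nil)
    | cons x rest =>
      have h0 : PySem.List.pyGetD (x :: rest) (0 : Int) ((0, 0), "") = x := by
        simp [PySem.List.pyGetD_zero_cons]
      simp only [h0]
      have := pv_index_fold_eq y_threshold (x :: rest) ([], [x])
      simp only [List.tail_cons] at this
      rw [this]
      have hglue : ∀ gs : List (List ((Int × Int) × String)), pvGlue [] gs = gs := by
        intro gs; cases gs <;> simp [pvGlue]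
      have := pv_chunk y_threshold rest x [] []
      simpa [hglue] using this
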